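-- pv_equiv track=rewrite | github.com/francisco-rma/problems | strings/rabin_karp.py | horner_rule
-- ===== SOURCE A (Python) =====
-- def horner_rule(text: str, idx: int = None) -> int:
--     if idx is None:
--         idx = len(text) - 1
--     if idx < 0 or idx >= len(text):
--         return 0
--     ord_val = ord(text[idx])
--     hr = horner_rule(text, idx - 1)
--     exponent = len(text) - idx - 1
--     return (10**exponent) * ord_val + hr
-- ===== SOURCE B (Python) =====
-- def horner_rule(text: str, idx: int = None) -> int:
--     n = len(text)
--     if idx is None:
--         idx = n - 1
--     if idx < 0 or idx >= n:
--         return 0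
--     h = 0
--     for c in text[:idx + 1]:
--         h = h * 10 + ord(c)
--     return h * 10 ** (n - 1 - idx)
-- ===== Notes on version B (the rewrite author's own statement) =====
-- stated objective: faster
-- what changed: Replaces the O(n)-deep recursion that multiplies each character code by an explicitly computed power 10**(len-idx-1) with a single iterative Horner pass (h = h*10 + ord(c)) over the prefix, followed by one final power multiplication.
import Mathlib
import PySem

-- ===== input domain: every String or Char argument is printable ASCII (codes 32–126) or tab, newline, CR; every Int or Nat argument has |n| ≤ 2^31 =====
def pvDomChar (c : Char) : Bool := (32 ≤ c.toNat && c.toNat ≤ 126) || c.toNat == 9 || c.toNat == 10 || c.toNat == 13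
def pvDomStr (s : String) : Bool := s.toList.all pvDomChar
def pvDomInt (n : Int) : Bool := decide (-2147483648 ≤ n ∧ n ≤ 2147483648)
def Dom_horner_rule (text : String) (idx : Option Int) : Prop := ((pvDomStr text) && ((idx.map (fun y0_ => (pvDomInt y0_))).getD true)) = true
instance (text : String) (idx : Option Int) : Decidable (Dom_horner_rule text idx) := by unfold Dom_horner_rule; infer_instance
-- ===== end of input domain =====

-- B replaces A's O(n)-deep recursion with explicit powers by one iterative Horner pass; objective: faster.
-- ===== PORT A =====
-- recursive helper: the body of Python A after idx has been defaulted
def hornerRuleRec (cs : List Char) (idx : Int) : Int :=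
  if idx < 0 ∨ (cs.length : Int) ≤ idx then 0
  else
    let ord_val : Int := (PySem.List.pyGetD cs idx ' ').toNat
    let hr := hornerRuleRec cs (idx - 1)
    let exponent := (cs.length : Int) - idx - 1
    10 ^ exponent.toNat * ord_val + hr
termination_by (idx + 1).toNat
decreasing_by omega

def horner_rule (text : String) (idx : Option Int) : Int :=
  let cs := text.toList
  let i : Int := match idx with | none => (cs.length : Int) - 1 | some j => j
  hornerRuleRec cs i

-- ===== PORT B =====
def horner_rule_alt (text : String) (idx : Option Int) : Int :=
  let cs := text.toList
  let n := cs.length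
  let i : Int := match idx with | none => (n : Int) - 1 | some j => j
  if i < 0 ∨ (n : Int) ≤ i then 0
  else
    let h := (PySem.List.slice cs none (some (i + 1))).foldl
      (fun h c => h * 10 + (c.toNat : Int)) 0
    h * 10 ^ ((n : Int) - 1 - i).toNat

-- ===== PRECONDITION & SPEC =====
def Spec_horner_rule (text : String) (idx : Option Int) (out : Int) : Prop := out = horner_rule_alt text idx
instance (text : String) (idx : Option Int) (out : Int) : Decidable (Spec_horner_rule text idx out) := by unfold Spec_horner_rule; infer_instance

-- ===== CLAIM (what is proved, stated in full; the proofs are below) =====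
def Claim_equal_horner_rule : Prop := ∀ (text : String) (idx : Option Int), Dom_horner_rule text idx → Spec_horner_rule text idx (horner_rule text idx)

-- ===== LEMMAS AND PROOFS =====



-- Horner fold over a character list
def hornerFold (l : List Char) : Int :=
  l.foldl (fun h c => h * 10 + (c.toNat : Int)) 0

lemma hornerFold_append_singleton (l : List Char) (c : Char) :
    hornerFold (l ++ [c]) = hornerFold l * 10 + (c.toNat : Int) := by
  simp [hornerFold]

lemma hornerRuleRec_out (cs : List Char) (i : Int)
    (h : i < 0 ∨ (cs.length : Int) ≤ i) : hornerRuleRec cs i = 0 := by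
  rw [hornerRuleRec, if_pos h]

lemma hornerRuleRec_in (cs : List Char) (i : Int)
    (h : ¬(i < 0 ∨ (cs.length : Int) ≤ i)) :
    hornerRuleRec cs i =
      10 ^ ((cs.length : Int) - i - 1).toNat * ((PySem.List.pyGetD cs i ' ').toNat : Int)
        + hornerRuleRec cs (i - 1) := by
  rw [hornerRuleRec, if_neg h]

-- the key invariant: A's recursion equals B's fold over the prefix, scaled by the power
lemma hornerRuleRec_eq (cs : List Char) (k : Nat) (hk : k < cs.length) :
    hornerRuleRec cs (k : Int) =
      hornerFold (cs.take (k + 1)) * 10 ^ (cs.length - 1 - k) := by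
  have hget : ∀ m : Nat, PySem.List.pyGetD cs (m : Int) ' ' = cs.getD m ' ' :=
    fun m => by exact_mod_cast PySem.List.pyGetD_natCast cs m ' '
  have htake : ∀ m : Nat, m < cs.length →
      cs.take (m + 1) = cs.take m ++ [cs.getD m ' '] := by
    intro m hm
    have hg : cs.getD m ' ' = cs[m]'hm := by
      simp [List.getD_eq_getElem?_getD, List.getElem?_eq_getElem hm]
    rw [hg, List.take_add_one, List.getElem?_eq_getElem hm]
    rfl
  induction k with
  | zero =>
    rw [show ((0 : Nat) : Int) = (0 : Int) from rfl]
    rw [hornerRuleRec_in cs 0 (by omega), hornerRuleRec_out cs (0 - 1) (by omega),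
      show PySem.List.pyGetD cs 0 ' ' = cs.getD 0 ' ' from hget 0, htake 0 hk]
    simp [hornerFold]
    ring
  | succ m ih =>
    have hm : m < cs.length := by omega
    have hc : ¬(((m + 1 : Nat) : Int) < 0 ∨ (cs.length : Int) ≤ ((m + 1 : Nat) : Int)) := by
      push_cast; omega
    rw [hornerRuleRec_in cs ((m + 1 : Nat) : Int) hc]
    have hprev : ((m + 1 : Nat) : Int) - 1 = (m : Int) := by push_cast; ring
    rw [hprev, ih hm, hget (m + 1), htake (m + 1) hk, hornerFold_append_singleton]
    have he : ((cs.length : Int) - ((m + 1 : Nat) : Int) - 1).toNat = cs.length - 1 - (m + 1) := by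
      omega
    have he2 : cs.length - 1 - m = (cs.length - 1 - (m + 1)) + 1 := by omega
    rw [he, he2, pow_succ]
    ring

lemma horner_eq_alt_of_range (cs : List Char) (i : Int)
    (h0 : 0 ≤ i) (h1 : i < (cs.length : Int)) :
    hornerRuleRec cs i =
      (PySem.List.slice cs none (some (i + 1))).foldl
        (fun h c => h * 10 + (c.toNat : Int)) 0 * 10 ^ ((cs.length : Int) - 1 - i).toNat := by
  obtain ⟨k, rfl⟩ : ∃ k : Nat, i = (k : Int) := ⟨i.toNat, by omega⟩
  have hk : k < cs.length := by exact_mod_cast h1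
  have hsl : PySem.List.slice cs none (some ((k : Int) + 1)) = cs.take (k + 1) := by
    have := PySem.List.slice_to_natCast cs (k + 1)
    rw [← this]; push_cast; ring_nf
  rw [hsl, hornerRuleRec_eq cs k hk]
  have : ((cs.length : Int) - 1 - (k : Int)).toNat = cs.length - 1 - k := by omega
  rw [this, hornerFold]

theorem horner_rule_agree (text : String) (idx : Option Int) :
    horner_rule text idx = horner_rule_alt text idx := by
  unfold horner_rule horner_rule_alt
  rcases idx with _ | j
  · simp only
    by_cases h : (text.toList.length : Int) - 1 < 0 ∨ (text.toList.length : Int) ≤ (text.toList.length : Int) - 1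
    · rw [if_pos h, hornerRuleRec_out _ _ h]
    · rw [if_neg h]
      exact horner_eq_alt_of_range _ _ (by omega) (by omega)
  · simp only
    by_cases h : j < 0 ∨ (text.toList.length : Int) ≤ j
    · rw [if_pos h, hornerRuleRec_out _ _ h]
    · rw [if_neg h]
      exact horner_eq_alt_of_range _ _ (by omega) (by omega)

-- ===== VERDICT =====
theorem horner_rule_spec : Claim_equal_horner_rule := by
  intro text idx _
  unfold Spec_horner_rule
  exact horner_rule_agree text idx
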